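-- pv_equiv track=rewrite | github.com/TaylorAmarelTech/giga-trader | src/phase_08_features_breadth/graph_attention_features.py | _map_columns_to_assets
-- ===== SOURCE A (Python) =====
-- from typing import ClassVar, Dict, List, Optional, Set
--
-- _CROSS_ASSET_RETURN_COLS: Dict[str, str] = {
--     "TLT": "TLT_return",
--     "GLD": "GLD_return",
--     "QQQ": "QQQ_return",
--     "IWM": "IWM_return",
--     "VXX": "VXX_return",
--     "HYG": "HYG_return",
-- }
--
-- def _map_columns_to_assets(asset_cols: List[str]) -> Dict[str, str]:
--     """Map return-matrix column names to canonical asset names."""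
--     mapping = {}
--     for col in asset_cols:
--         if col == "SPY_return":
--             mapping[col] = "SPY"
--         else:
--             # e.g., "TLT_return" -> "TLT"
--             for asset_name, col_name in _CROSS_ASSET_RETURN_COLS.items():
--                 if col == col_name:
--                     mapping[col] = asset_name
--                     break
--     return mapping
-- ===== SOURCE B (Python) =====
-- _VALID_ASSETS = {"SPY", "TLT", "GLD", "QQQ", "IWM", "VXX", "HYG"}
--
-- def _map_columns_to_assets(asset_cols):
--     """Map return-matrix column names to canonical asset names."""
--     mapping = {}
--     for col in asset_cols:
--         if col.endswith("_return"):
--             name = col[:-7]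
--             if name in _VALID_ASSETS:
--                 mapping[col] = name
--     return mapping
-- ===== Notes on version B (the rewrite author's own statement) =====
-- stated objective: simpler
-- what changed: B parses each column by checking the '_return' suffix and looking the stripped prefix up in one set of valid asset names, replacing A's special-case SPY branch and inner scan over a table of full column names.
import Mathlib
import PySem

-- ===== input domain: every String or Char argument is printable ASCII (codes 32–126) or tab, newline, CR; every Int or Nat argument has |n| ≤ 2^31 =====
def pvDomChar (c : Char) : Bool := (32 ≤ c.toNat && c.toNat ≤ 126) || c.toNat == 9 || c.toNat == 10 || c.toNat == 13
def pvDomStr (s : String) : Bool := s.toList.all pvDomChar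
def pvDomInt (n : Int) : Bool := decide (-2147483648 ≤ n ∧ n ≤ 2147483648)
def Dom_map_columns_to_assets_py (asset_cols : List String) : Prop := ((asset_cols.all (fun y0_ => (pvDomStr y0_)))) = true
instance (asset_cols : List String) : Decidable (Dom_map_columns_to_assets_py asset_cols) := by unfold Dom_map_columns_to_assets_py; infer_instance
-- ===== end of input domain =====

-- B parses the "_return" suffix off each column and checks the prefix against one set of
-- valid asset names, replacing A's special-case SPY branch and inner scan over a table of
-- full column names (objective: simpler).

-- ===== PORT A =====
-- the module constant _CROSS_ASSET_RETURN_COLS, as its (key, value) items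
def pvCrossAssetItems : List (String × String) :=
  [("TLT", "TLT_return"), ("GLD", "GLD_return"), ("QQQ", "QQQ_return"),
   ("IWM", "IWM_return"), ("VXX", "VXX_return"), ("HYG", "HYG_return")]

-- A's inner 'for asset_name, col_name in …: if col == col_name: …; break'
def pvInnerA (col : String) (mapping : PySem.Dict String String) :
    List (String × String) → PySem.Dict String String
  | [] => mapping
  | (assetName, colName) :: rest =>
      if col == colName then mapping.insert col assetName
      else pvInnerA col mapping rest

def map_columns_to_assets_py (asset_cols : List String) : List (String × String) :=
  (asset_cols.foldl (fun mapping col =>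
      if col == "SPY_return" then mapping.insert col "SPY"
      else pvInnerA col mapping pvCrossAssetItems) PySem.Dict.empty).items

-- ===== PORT B =====
-- the module constant _VALID_ASSETS
def pvValidAssets : PySem.Set String :=
  PySem.Set.ofList ["SPY", "TLT", "GLD", "QQQ", "IWM", "VXX", "HYG"]

def map_columns_to_assets_py_alt (asset_cols : List String) : List (String × String) :=
  (asset_cols.foldl (fun mapping col =>
      if PySem.Str.endswith col "_return" then
        let name := PySem.Str.slice col none (some (-7))
        if PySem.Set.contains pvValidAssets name then mapping.insert col name
        else mapping
      else mapping) PySem.Dict.empty).items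

-- ===== PRECONDITION & SPEC =====
def Spec_map_columns_to_assets_py (asset_cols : List String) (out : List (String × String)) : Prop := out = map_columns_to_assets_py_alt asset_cols
instance (asset_cols : List String) (out : List (String × String)) : Decidable (Spec_map_columns_to_assets_py asset_cols out) := by unfold Spec_map_columns_to_assets_py; infer_instance

-- ===== CLAIM (what is proved, stated in full; the proofs are below) =====
def Claim_equal_map_columns_to_assets_py : Prop := ∀ (asset_cols : List String), Dom_map_columns_to_assets_py asset_cols → Spec_map_columns_to_assets_py asset_cols (map_columns_to_assets_py asset_cols)

-- ===== LEMMAS AND PROOFS =====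

-- if B's condition fires, col is one of the seven full "<name>_return" column names
lemma pv_cond_mem (col : String)
    (h1 : PySem.Str.endswith col "_return" = true)
    (h2 : PySem.Set.contains pvValidAssets (PySem.Str.slice col none (some (-7))) = true) :
    col ∈ ["SPY_return", "TLT_return", "GLD_return", "QQQ_return",
           "IWM_return", "VXX_return", "HYG_return"] := by
  rw [PySem.Str.endswith_eq, PySem.Chars.endswith_iff] at h1
  obtain ⟨t, ht⟩ := h1
  have hslice : (PySem.Str.slice col none (some (-7))).toList = t := by
    simp only [PySem.Str.slice, PySem.Chars.slice_eq_listSlice]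
    rw [PySem.List.slice_to_neg_ofNat col.toList 7 (by norm_num), ← ht]
    simp [List.take_left']
  rw [PySem.Set.contains_iff] at h2
  simp only [pvValidAssets, PySem.Set.mem_ofList, List.mem_cons, List.not_mem_nil,
    or_false] at h2
  have hcol : ∀ nm : String, PySem.Str.slice col none (some (-7)) = nm →
      col.toList = nm.toList ++ "_return".toList := by
    intro nm hnm
    rw [← ht]
    congr 1
    rw [← hslice, hnm]
  simp only [List.mem_cons, List.not_mem_nil, or_false]
  rcases h2 with h | h | h | h | h | h | h
  · simp [String.toList_inj.mp (show col.toList = ("SPY_return" : String).toList by rw [hcol _ h]; rfl)]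
  · simp [String.toList_inj.mp (show col.toList = ("TLT_return" : String).toList by rw [hcol _ h]; rfl)]
  · simp [String.toList_inj.mp (show col.toList = ("GLD_return" : String).toList by rw [hcol _ h]; rfl)]
  · simp [String.toList_inj.mp (show col.toList = ("QQQ_return" : String).toList by rw [hcol _ h]; rfl)]
  · simp [String.toList_inj.mp (show col.toList = ("IWM_return" : String).toList by rw [hcol _ h]; rfl)]
  · simp [String.toList_inj.mp (show col.toList = ("VXX_return" : String).toList by rw [hcol _ h]; rfl)]
  · simp [String.toList_inj.mp (show col.toList = ("HYG_return" : String).toList by rw [hcol _ h]; rfl)]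

-- the two per-column step functions are equal
lemma pv_step_eq (mapping : PySem.Dict String String) (col : String) :
    (if col == "SPY_return" then mapping.insert col "SPY"
     else pvInnerA col mapping pvCrossAssetItems)
    = (if PySem.Str.endswith col "_return" then
        let name := PySem.Str.slice col none (some (-7))
        if PySem.Set.contains pvValidAssets name then mapping.insert col name
        else mapping
      else mapping) := by
  by_cases hmem : col ∈ ["SPY_return", "TLT_return", "GLD_return", "QQQ_return",
      "IWM_return", "VXX_return", "HYG_return"]
  · simp only [List.mem_cons, List.not_mem_nil, or_false] at hmem
    rcases hmem with rfl | rfl | rfl | rfl | rfl | rfl | rfl <;> rfl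
  · have hA : (if col == "SPY_return" then mapping.insert col "SPY"
        else pvInnerA col mapping pvCrossAssetItems) = mapping := by
      simp only [List.mem_cons, List.not_mem_nil, or_false, not_or] at hmem
      obtain ⟨h1, h2, h3, h4, h5, h6, h7⟩ := hmem
      simp [pvInnerA, pvCrossAssetItems, h1, h2, h3, h4, h5, h6, h7]
    have hB : (if PySem.Str.endswith col "_return" then
        let name := PySem.Str.slice col none (some (-7))
        if PySem.Set.contains pvValidAssets name then mapping.insert col name
        else mapping
      else mapping) = mapping := by
      by_cases he : PySem.Str.endswith col "_return" = true
      · by_cases hc :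
            PySem.Set.contains pvValidAssets (PySem.Str.slice col none (some (-7))) = true
        · exact absurd (pv_cond_mem col he hc) hmem
        · rw [if_pos he]
          show (if PySem.Set.contains pvValidAssets
              (PySem.Str.slice col none (some (-7))) = true
            then mapping.insert col (PySem.Str.slice col none (some (-7)))
            else mapping) = mapping
          rw [if_neg hc]
      · rw [if_neg he]
    rw [hA, hB]

-- ===== VERDICT (by name: the statement is the Claim_ definition above) =====
theorem map_columns_to_assets_py_spec : Claim_equal_map_columns_to_assets_py := by
  intro asset_cols _
  unfold Spec_map_columns_to_assets_py map_columns_to_assets_py map_columns_to_assets_py_alt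
  congr 1
  have hstep : (fun (mapping : PySem.Dict String String) col =>
      if col == "SPY_return" then mapping.insert col "SPY"
      else pvInnerA col mapping pvCrossAssetItems)
      = (fun (mapping : PySem.Dict String String) col =>
      if PySem.Str.endswith col "_return" then
        let name := PySem.Str.slice col none (some (-7))
        if PySem.Set.contains pvValidAssets name then mapping.insert col name
        else mapping
      else mapping) := by
    funext m c; exact pv_step_eq m c
  rw [hstep]
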